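-- pv_equiv track=rewrite | github.com/Jangmiws/Communicative-Robot-Cinematographer | coroc_project.py | slice_move
-- ===== SOURCE A (Python) =====
-- def slice_move(a, substring, n):
--     index = -1
--     for _ in range(n):
--         index = a.find(substring, index + 1)
--         if index == -1:
--             break
--     if index != -1:
--         index += len(substring) + 3
--         return a[:index]
--     else:
--         return None
-- ===== SOURCE B (Python) =====
-- def slice_move(a, substring, n):
--     # Build the full index of all (overlapping) occurrence positions once,
--     # then select the n-th one by plain list indexing.
--     occ = [i for i in range(len(a) + 1) if a.startswith(substring, i)]
--     if 0 < n <= len(occ):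
--         return a[:occ[n - 1] + len(substring) + 3]
--     return None
-- ===== Notes on version B (the rewrite author's own statement) =====
-- stated objective: alternative
-- what changed: B first materializes the complete list of all (overlapping) occurrence positions in one staged comprehension pass and then merely indexes its n-th element, instead of A's stateful cursor loop that calls find n times and stops early.
import Mathlib
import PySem

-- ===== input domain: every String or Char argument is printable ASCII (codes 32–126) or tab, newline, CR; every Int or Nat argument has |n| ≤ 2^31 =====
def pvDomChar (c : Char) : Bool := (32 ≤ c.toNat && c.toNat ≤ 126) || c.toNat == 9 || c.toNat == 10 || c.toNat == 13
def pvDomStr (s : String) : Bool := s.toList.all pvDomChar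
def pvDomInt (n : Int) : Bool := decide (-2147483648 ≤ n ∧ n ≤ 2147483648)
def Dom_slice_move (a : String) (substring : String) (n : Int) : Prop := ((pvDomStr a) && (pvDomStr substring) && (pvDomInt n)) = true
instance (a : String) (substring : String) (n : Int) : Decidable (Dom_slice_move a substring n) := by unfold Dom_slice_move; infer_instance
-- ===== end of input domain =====

-- B builds the complete index of all (overlapping) occurrence positions once and then selects the
-- n-th by list indexing, replacing A's stateful find-cursor loop (alternative decomposition; same value).

-- ===== PORT A =====
-- the `for _ in range(n)` loop of A: fuel = number of remaining iterations, state = `index`;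
-- `break` on -1 returns -1 (the final `if` then yields None), exactly as in A.
def sliceMoveLoopA (a : String) (substring : String) : Nat → Int → Int
  | 0, index => index
  | k + 1, index =>
      let idx := PySem.Str.findFrom a substring (index + 1)
      if idx = -1 then idx else sliceMoveLoopA a substring k idx

def slice_move (a : String) (substring : String) (n : Int) : Option String :=
  let index := sliceMoveLoopA a substring n.toNat (-1)
  if index ≠ -1 then
    some (PySem.Str.slice a none (some (index + PySem.Str.len substring + 3)))
  else none

-- ===== PORT B =====
-- `[i for i in range(len(a) + 1) if a.startswith(substring, i)]`;
-- `a.startswith(substring, i)` ported by hand as a prefix test on the dropped list — exact for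
-- every i produced by the range, i.e. 0 ≤ i ≤ len(a).
def sliceMoveOcc (a : String) (substring : String) : List Int :=
  (PySem.List.pyRange 0 (PySem.Str.len a + 1) 1).filter
    (fun i => substring.toList.isPrefixOf (a.toList.drop i.toNat))

def slice_move_alt (a : String) (substring : String) (n : Int) : Option String :=
  let occ := sliceMoveOcc a substring
  if 0 < n ∧ n ≤ (occ.length : Int) then
    -- `occ[n-1]`: the guard makes the index in range, so pyGet? is some here
    (PySem.List.pyGet? occ (n - 1)).map
      (fun p => PySem.Str.slice a none (some (p + PySem.Str.len substring + 3)))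
  else none

-- ===== PRECONDITION & SPEC =====
def Spec_slice_move (a : String) (substring : String) (n : Int) (out : Option String) : Prop := out = slice_move_alt a substring n
instance (a : String) (substring : String) (n : Int) (out : Option String) : Decidable (Spec_slice_move a substring n out) := by unfold Spec_slice_move; infer_instance

-- ===== CLAIM (what is proved, stated in full; the proofs are below) =====
def Claim_equal_slice_move : Prop := ∀ (a : String) (substring : String) (n : Int), Dom_slice_move a substring n → Spec_slice_move a substring n (slice_move a substring n)

-- ===== LEMMAS AND PROOFS =====

-- position of the (m+1)-st match of `sub` at a start position ≥ k (a match at position i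
-- means `sub <+: s.drop i`; positions run up to s.length inclusive, as Python's find does)
def nthM (s sub : List Char) (k m : Nat) : Option Nat :=
  if h : s.length < k then none
  else if sub.isPrefixOf (s.drop k) then
    (if m = 0 then some k else nthM s sub (k + 1) (m - 1))
  else nthM s sub (k + 1) m
  termination_by s.length + 1 - k
  decreasing_by all_goals omega

theorem nthM_of_gt {s sub : List Char} {k m : Nat} (h : s.length < k) : nthM s sub k m = none := by
  rw [nthM]; simp [h]

theorem nthM_none_aux (s sub : List Char) :
    ∀ d k, s.length + 1 - k ≤ d → (∀ i, k ≤ i → i ≤ s.length → ¬ sub <+: s.drop i) →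
      ∀ m, nthM s sub k m = none := by
  intro d
  induction d with
  | zero => intro k hd _ m; exact nthM_of_gt (by omega)
  | succ d ih =>
    intro k hd h m
    by_cases hk : s.length < k
    · exact nthM_of_gt hk
    · rw [nthM]
      have hnp : sub.isPrefixOf (s.drop k) = false := by
        rw [Bool.eq_false_iff]
        intro hc
        exact h k le_rfl (by omega) (List.isPrefixOf_iff_prefix.mp hc)
      simp only [dif_neg hk, hnp, Bool.false_eq_true, if_false]
      exact ih (k + 1) (by omega) (fun i hi hle => h i (by omega) hle) m

theorem nthM_eq_none_of_no_match {s sub : List Char} {k : Nat}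
    (h : ∀ i, k ≤ i → i ≤ s.length → ¬ sub <+: s.drop i) (m : Nat) : nthM s sub k m = none :=
  nthM_none_aux s sub (s.length + 1 - k) k le_rfl h m

theorem nthM_some_aux (s sub : List Char) :
    ∀ d k p, p - k ≤ d → k ≤ p → p ≤ s.length → sub <+: s.drop p →
      (∀ i, k ≤ i → i < p → ¬ sub <+: s.drop i) → nthM s sub k 0 = some p := by
  intro d
  induction d with
  | zero =>
    intro k p hd hkp hp hm _
    have : k = p := by omega
    subst this
    rw [nthM]
    simp [Nat.not_lt.mpr hp, List.isPrefixOf_iff_prefix.mpr hm]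
  | succ d ih =>
    intro k p hd hkp hp hm hmin
    by_cases he : k = p
    · subst he
      rw [nthM]
      simp [Nat.not_lt.mpr hp, List.isPrefixOf_iff_prefix.mpr hm]
    · have hlt : k < p := by omega
      rw [nthM]
      have hnp : sub.isPrefixOf (s.drop k) = false := by
        rw [Bool.eq_false_iff]
        intro hc
        exact hmin k le_rfl hlt (List.isPrefixOf_iff_prefix.mp hc)
      simp only [dif_neg (by omega : ¬ s.length < k), hnp, Bool.false_eq_true, if_false]
      exact ih (k + 1) p (by omega) (by omega) hp hm (fun i hi hilt => hmin i (by omega) hilt)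

theorem nthM_eq_some_of {s sub : List Char} {k p : Nat}
    (hkp : k ≤ p) (hp : p ≤ s.length) (hm : sub <+: s.drop p)
    (hmin : ∀ i, k ≤ i → i < p → ¬ sub <+: s.drop i) : nthM s sub k 0 = some p :=
  nthM_some_aux s sub (p - k) k p le_rfl hkp hp hm hmin

theorem nthM_succ_aux (s sub : List Char) (m : Nat) :
    ∀ d k, s.length + 1 - k ≤ d →
      nthM s sub k (m + 1) = (match nthM s sub k 0 with
        | none => none
        | some p => nthM s sub (p + 1) m) := by
  intro d
  induction d with
  | zero =>
    intro k hd
    rw [nthM_of_gt (by omega), nthM_of_gt (by omega)]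
  | succ d ih =>
    intro k hd
    by_cases hk : s.length < k
    · rw [nthM_of_gt hk, nthM_of_gt hk]
    · by_cases hpre : sub.isPrefixOf (s.drop k) = true
      · have h0 : nthM s sub k 0 = some k := by
          rw [nthM]; simp [dif_neg hk, hpre]
        have h1 : nthM s sub k (m + 1) = nthM s sub (k + 1) m := by
          rw [nthM]; simp [dif_neg hk, hpre]
        rw [h1, h0]
      · have h0 : nthM s sub k 0 = nthM s sub (k + 1) 0 := by
          conv_lhs => rw [nthM]
          simp [dif_neg hk, hpre]
        have h1 : nthM s sub k (m + 1) = nthM s sub (k + 1) (m + 1) := by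
          conv_lhs => rw [nthM]
          simp [dif_neg hk, hpre]
        rw [h1, h0]
        exact ih (k + 1) (by omega)

theorem nthM_succ (s sub : List Char) (k m : Nat) :
    nthM s sub k (m + 1) = (match nthM s sub k 0 with
      | none => none
      | some p => nthM s sub (p + 1) m) :=
  nthM_succ_aux s sub m (s.length + 1 - k) k le_rfl

-- findFrom past the end is -1 (Python's quirk, also for the empty substring)
theorem findFrom_of_gt (s sub : List Char) {k : Nat} (h : s.length < k) :
    PySem.Chars.findFrom (s := s) (sub := sub) (k : Int) = -1 := by
  simp only [PySem.Chars.findFrom]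
  rw [if_neg (by omega : ¬ ((k : Int) < 0)), if_pos (by exact_mod_cast h)]

-- str.find(sub, k) is exactly the first match position ≥ k (or -1)
theorem findFrom_eq_nthM (s sub : List Char) (k : Nat) :
    PySem.Chars.findFrom (s := s) (sub := sub) (k : Int)
      = (match nthM s sub k 0 with | some p => (p : Int) | none => -1) := by
  by_cases hk : s.length < k
  · rw [findFrom_of_gt s sub hk, nthM_of_gt hk]
  · rw [PySem.Chars.findFrom_natCast s sub k (by omega)]
    by_cases hF : PySem.Chars.find (s.drop k) sub = -1
    · have hni : ¬ sub <:+: s.drop k := (PySem.Chars.find_eq_neg_one_iff _ _).mp hF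
      have hn : nthM s sub k 0 = none := by
        apply nthM_eq_none_of_no_match
        intro i hki _ hpre
        apply hni
        apply (PySem.Chars.isIn_iff_infix _ _).mp
        apply (PySem.Chars.exists_prefix_drop_iff_isIn _ _).mp
        exact ⟨i - k, by rw [List.drop_drop, Nat.add_sub_cancel' hki]; exact hpre⟩
      rw [hn]
      simp [hF]
    · have hF0 : 0 ≤ PySem.Chars.find (s.drop k) sub := by
        have := PySem.Chars.neg_one_le_find (s.drop k) sub
        omega
      obtain ⟨hpre, hmin⟩ := PySem.Chars.find_spec hF0
      have hlen : PySem.Chars.find (s.drop k) sub ≤ (s.length : Int) - k := by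
        have := PySem.Chars.find_le_length (s.drop k) sub
        simp at this
        omega
      have hFt : ((PySem.Chars.find (s.drop k) sub).toNat : Int) = PySem.Chars.find (s.drop k) sub :=
        Int.toNat_of_nonneg hF0
      rw [List.drop_drop] at hpre
      have hs : nthM s sub k 0 = some (k + (PySem.Chars.find (s.drop k) sub).toNat) := by
        apply nthM_eq_some_of (by omega) (by omega) hpre
        intro i hki hilt hc
        apply hmin (i - k) (by omega)
        rw [List.drop_drop, Nat.add_sub_cancel' hki]
        exact hc
      rw [hs]
      simp only [hF, if_false]
      show (k : Int) + PySem.Chars.find (List.drop k s) sub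
        = ((k + (PySem.Chars.find (List.drop k s) sub).toNat : Nat) : Int)
      push_cast
      omega

-- A's loop computes the n-th match position
theorem loopA_eq (a substring : String) (f : Nat) :
    ∀ i : Int, -1 ≤ i →
      sliceMoveLoopA a substring (f + 1) i
        = (match nthM a.toList substring.toList (i + 1).toNat f with
            | some p => (p : Int) | none => -1) := by
  induction f with
  | zero =>
    intro i hi
    have h1 : i + 1 = (((i + 1).toNat : Nat) : Int) := by omega
    have hff : PySem.Str.findFrom a substring (i + 1)
        = (match nthM a.toList substring.toList (i + 1).toNat 0 with
            | some p => (p : Int) | none => -1) := by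
      conv_lhs => rw [PySem.Str.findFrom_eq, h1]
      exact findFrom_eq_nthM _ _ _
    simp only [sliceMoveLoopA]
    rw [hff]
    cases h0 : nthM a.toList substring.toList (i + 1).toNat 0 with
    | none => simp
    | some p => simp
  | succ f ih =>
    intro i hi
    have h1 : i + 1 = (((i + 1).toNat : Nat) : Int) := by omega
    have hff : PySem.Str.findFrom a substring (i + 1)
        = (match nthM a.toList substring.toList (i + 1).toNat 0 with
            | some p => (p : Int) | none => -1) := by
      conv_lhs => rw [PySem.Str.findFrom_eq, h1]
      exact findFrom_eq_nthM _ _ _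
    simp only [sliceMoveLoopA]
    rw [hff, nthM_succ]
    cases h0 : nthM a.toList substring.toList (i + 1).toNat 0 with
    | none => simp
    | some p =>
      simp only [if_neg (show ¬ ((p : Int) = -1) by omega)]
      have hfold : (if PySem.Str.findFrom a substring ((p : Int) + 1) = -1 then
            PySem.Str.findFrom a substring ((p : Int) + 1)
          else sliceMoveLoopA a substring f (PySem.Str.findFrom a substring ((p : Int) + 1)))
          = sliceMoveLoopA a substring (f + 1) (p : Int) := rfl
      rw [hfold, ih (p : Int) (by omega), show (((p : Int)) + 1).toNat = p + 1 by omega]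

-- B's occurrence list, read from position j on: its m-th element is the (m+1)-st match ≥ j
theorem occ_get_aux (a substring : String) :
    ∀ d j, a.toList.length + 1 - j ≤ d → ∀ m : Nat,
      ((PySem.List.pyRange (j : Int) ((a.toList.length : Int) + 1) 1).filter
          (fun i => substring.toList.isPrefixOf (a.toList.drop i.toNat)))[m]?
        = (nthM a.toList substring.toList j m).map (fun p => ((p : Nat) : Int)) := by
  intro d
  induction d with
  | zero =>
    intro j hd m
    rw [PySem.List.pyRange_one_eq_nil (by exact_mod_cast by omega : ((a.toList.length : Int) + 1) ≤ (j : Int)),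
      nthM_of_gt (by omega)]
    rfl
  | succ d ih =>
    intro j hd m
    by_cases hj : a.toList.length < j
    · rw [PySem.List.pyRange_one_eq_nil (by exact_mod_cast by omega : ((a.toList.length : Int) + 1) ≤ (j : Int)),
        nthM_of_gt hj]
      rfl
    · rw [PySem.List.pyRange_one_cons (by exact_mod_cast by omega : (j : Int) < (a.toList.length : Int) + 1),
        List.filter_cons]
      have hcast : ((j : Int) + 1) = (((j + 1 : Nat) : Nat) : Int) := by push_cast; ring
      have htn : ((j : Int)).toNat = j := by omega
      by_cases hm : substring.toList.isPrefixOf (a.toList.drop j) = true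
      · rw [if_pos (by simpa [htn] using hm)]
        cases m with
        | zero =>
          have h0 : nthM a.toList substring.toList j 0 = some j := by
            rw [nthM, dif_neg (Nat.not_lt.mpr (by omega)), if_pos hm, if_pos rfl]
          rw [h0]
          rfl
        | succ m =>
          have h1 : nthM a.toList substring.toList j (m + 1)
              = nthM a.toList substring.toList (j + 1) m := by
            rw [nthM, dif_neg (Nat.not_lt.mpr (by omega)), if_pos hm,
              if_neg (by omega : ¬ m + 1 = 0)]
            norm_num
          rw [h1, List.getElem?_cons_succ, hcast]
          exact ih (j + 1) (by omega) m
      · rw [if_neg (by simpa [htn] using hm)]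
        have h1 : nthM a.toList substring.toList j m
            = nthM a.toList substring.toList (j + 1) m := by
          rw [nthM, dif_neg (Nat.not_lt.mpr (by omega)), if_neg hm]
        rw [h1, hcast]
        exact ih (j + 1) (by omega) m

theorem occ_get (a substring : String) (m : Nat) :
    (sliceMoveOcc a substring)[m]?
      = (nthM a.toList substring.toList 0 m).map (fun p => ((p : Nat) : Int)) := by
  have := occ_get_aux a substring (a.toList.length + 1) 0 (by omega) m
  simpa [sliceMoveOcc, PySem.Str.len_eq] using this

-- ===== VERDICT (by name: the statement is the Claim_ definition above) =====
theorem slice_move_spec : Claim_equal_slice_move := by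
  intro a substring n _
  unfold Spec_slice_move
  simp only [slice_move, slice_move_alt]
  by_cases hn : n ≤ 0
  · rw [if_neg (by omega : ¬ (0 < n ∧ n ≤ ((sliceMoveOcc a substring).length : Int))),
      show n.toNat = 0 by omega]
    simp [sliceMoveLoopA]
  · rw [show n.toNat = (n - 1).toNat + 1 by omega,
      loopA_eq a substring _ (-1) (by omega),
      show ((-1 : Int) + 1).toNat = 0 by decide]
    have hocc := occ_get a substring (n - 1).toNat
    cases h0 : nthM a.toList substring.toList 0 (n - 1).toNat with
    | none =>
      rw [h0] at hocc
      have hlen : (sliceMoveOcc a substring).length ≤ (n - 1).toNat := by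
        by_contra hc
        rw [List.getElem?_eq_getElem (by omega)] at hocc
        simp at hocc
      rw [if_neg (by omega : ¬ (0 < n ∧ n ≤ ((sliceMoveOcc a substring).length : Int)))]
      simp
    | some p =>
      rw [h0] at hocc
      have hlt : (n - 1).toNat < (sliceMoveOcc a substring).length := by
        by_contra hc
        rw [List.getElem?_eq_none (by omega)] at hocc
        simp at hocc
      rw [if_pos (by constructor <;> omega : 0 < n ∧ n ≤ ((sliceMoveOcc a substring).length : Int)),
        PySem.List.pyGet?_of_nonneg _ (by omega : (0:Int) ≤ n - 1), hocc]
      simp [show ¬ ((p : Int) = -1) by omega]
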